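-- pv_equiv track=rewrite | github.com/Orchestra-Research/Agent-Native-Research-Artifact | skills/meta-research/templates/render-tree.py | _split_flow
-- ===== SOURCE A (Python) =====
-- def _split_flow(s):
--     """Split comma-separated flow values, respecting brackets."""
--     items = []
--     depth = 0
--     current = ""
--     for ch in s:
--         if ch in "[{":
--             depth += 1
--         elif ch in "]}":
--             depth -= 1
--         if ch == "," and depth == 0:
--             items.append(current)
--             current = ""
--         else:
--             current += ch
--     if current.strip():
--         items.append(current)
--     return items
-- ===== SOURCE B (Python) =====
-- def _first_cut(s):
--     """Index of the first top-level (bracket-depth-0) comma in s, or -1."""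
--     depth = 0
--     for i, ch in enumerate(s):
--         if ch in "[{":
--             depth += 1
--         elif ch in "]}":
--             depth -= 1
--         elif ch == "," and depth == 0:
--             return i
--     return -1
--
--
-- def _split_flow(s):
--     """Split comma-separated flow values, respecting brackets."""
--     items = []
--     rest = s
--     while True:
--         i = _first_cut(rest)
--         if i == -1:
--             break
--         items.append(rest[:i])
--         rest = rest[i + 1:]
--     if rest.strip():
--         items.append(rest)
--     return items
-- ===== Notes on version B (the rewrite author's own statement) =====
-- stated objective: alternative
-- what changed: B replaces A's single accumulate-and-append loop (growing a 'current' buffer character by character) with a boundary-first decomposition: a helper scans for the index of the next depth-0 comma, the segment is produced by slicing, and the blank-tail trim is the loop's exit case rather than interleaved state.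
import Mathlib
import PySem

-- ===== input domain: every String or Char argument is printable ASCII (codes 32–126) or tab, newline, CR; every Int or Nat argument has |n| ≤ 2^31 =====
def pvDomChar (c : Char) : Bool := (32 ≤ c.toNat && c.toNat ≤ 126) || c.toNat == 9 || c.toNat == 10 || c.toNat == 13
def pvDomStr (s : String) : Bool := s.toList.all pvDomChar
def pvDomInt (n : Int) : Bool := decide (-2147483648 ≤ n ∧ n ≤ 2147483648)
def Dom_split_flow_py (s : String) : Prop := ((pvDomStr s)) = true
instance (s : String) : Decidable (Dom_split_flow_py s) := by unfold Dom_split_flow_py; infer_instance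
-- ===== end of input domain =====

-- B keeps A's return value but reorganises the work: boundary-finding first, slicing second,
-- with the blank-tail trim outside the main loop (objective: alternative decomposition).

-- ===== PORT A =====
-- loop body of A: update depth from the bracket chars, then either close the
-- current segment (depth-0 comma) or extend it
def stepA (st : List String × Int × List Char) (ch : Char) : List String × Int × List Char :=
  let depth :=
    if ch = '[' ∨ ch = '{' then st.2.1 + 1
    else if ch = ']' ∨ ch = '}' then st.2.1 - 1
    else st.2.1
  if ch = ',' ∧ depth = 0 then (st.1 ++ [String.mk st.2.2], depth, ([] : List Char))
  else (st.1, depth, st.2.2 ++ [ch])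

-- literal port of A: one fold over the characters carrying (items, depth, current)
def split_flow_py (s : String) : List String :=
  let r := s.toList.foldl stepA ([], 0, [])
  if PySem.Chars.strip r.2.2 ≠ [] then r.1 ++ [String.mk r.2.2] else r.1

-- ===== PORT B =====
-- port of Source B's _first_cut(s): scan (i, ch) over enumerate(s) with a depth counter
def firstCutGo (d : Int) : List (Int × Char) → Int
  | [] => -1
  | p :: rest =>
    if p.2 = '[' ∨ p.2 = '{' then firstCutGo (d + 1) rest
    else if p.2 = ']' ∨ p.2 = '}' then firstCutGo (d - 1) rest
    else if p.2 = ',' ∧ d = 0 then p.1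
    else firstCutGo d rest

def firstCut (cs : List Char) : Int := firstCutGo 0 (PySem.List.enumerate cs)

-- port of Source B's main while-loop: find next boundary, slice the segment off, continue
-- on the remainder (fuel only makes the loop total; length + 1 steps always suffice)
def altLoop : Nat → List Char → List String → List String
  | 0, _, items => items
  | fuel + 1, rest, items =>
    let i := firstCut rest
    if i = -1 then
      if PySem.Chars.strip rest ≠ [] then items ++ [String.mk rest] else items
    else
      altLoop fuel (PySem.List.slice rest (some (i + 1)) none)
        (items ++ [String.mk (PySem.List.slice rest none (some i))])

def split_flow_py_alt (s : String) : List String :=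
  altLoop (s.toList.length + 1) s.toList []

-- ===== PRECONDITION & SPEC =====
def Spec_split_flow_py (s : String) (out : List String) : Prop := out = split_flow_py_alt s
instance (s : String) (out : List String) : Decidable (Spec_split_flow_py s out) := by unfold Spec_split_flow_py; infer_instance

-- ===== CLAIM (what is proved, stated in full; the proofs are below) =====
def Claim_equal_split_flow_py : Prop := ∀ (s : String), Dom_split_flow_py s → Spec_split_flow_py s (split_flow_py s)

-- ===== LEMMAS AND PROOFS =====

-- the depth update on its own
def bumpD (dd : Int) (ch : Char) : Int :=
  if ch = '[' ∨ ch = '{' then dd + 1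
  else if ch = ']' ∨ ch = '}' then dd - 1
  else dd

-- all segments of cs split at depth-0 commas, starting from depth d (always nonempty)
def segs : Int → List Char → List (List Char)
  | _, [] => [[]]
  | d, ch :: cs =>
    if ch = '[' ∨ ch = '{' then
      match segs (d + 1) cs with
      | [] => [[ch]]
      | t :: ts => (ch :: t) :: ts
    else if ch = ']' ∨ ch = '}' then
      match segs (d - 1) cs with
      | [] => [[ch]]
      | t :: ts => (ch :: t) :: ts
    else if ch = ',' ∧ d = 0 then [] :: segs d cs
    else
      match segs d cs with
      | [] => [[ch]]
      | t :: ts => (ch :: t) :: ts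

lemma segs_ne_nil (d : Int) (cs : List Char) : segs d cs ≠ [] := by
  cases cs with
  | nil => simp [segs]
  | cons ch cs =>
    unfold segs
    split_ifs
    · cases segs (d + 1) cs <;> simp
    · cases segs (d - 1) cs <;> simp
    · simp
    · cases segs d cs <;> simp

-- relative position of the first depth-0 comma, as segs sees it
def scan : Int → List Char → Option Nat
  | _, [] => none
  | d, ch :: cs =>
    if ch = '[' ∨ ch = '{' then (scan (d + 1) cs).map (· + 1)
    else if ch = ']' ∨ ch = '}' then (scan (d - 1) cs).map (· + 1)
    else if ch = ',' ∧ d = 0 then some 0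
    else (scan d cs).map (· + 1)

lemma firstCutGo_eq_scan (cs : List Char) : ∀ (d : Int) (k : Int),
    firstCutGo d (PySem.List.enumerate cs k)
      = (scan d cs).elim (-1) (fun n => k + (n : Int)) := by
  induction cs with
  | nil => intro d k; simp [PySem.List.enumerate_nil, firstCutGo, scan]
  | cons ch cs ih =>
    intro d k
    rw [PySem.List.enumerate_cons, firstCutGo, scan]
    split_ifs with h1 h2 h3
    · rw [ih (d + 1) (k + 1)]
      cases hs : scan (d + 1) cs <;> simp <;> ring
    · rw [ih (d - 1) (k + 1)]
      cases hs : scan (d - 1) cs <;> simp <;> ring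
    · simp
    · rw [ih d (k + 1)]
      cases hs : scan d cs <;> simp <;> ring

lemma firstCut_eq_scan (cs : List Char) :
    firstCut cs = (scan 0 cs).elim (-1) (fun n => ((n : Nat) : Int)) := by
  rw [firstCut, firstCutGo_eq_scan cs 0 0]
  cases hs : scan 0 cs <;> simp

lemma scan_none_segs (cs : List Char) : ∀ (d : Int), scan d cs = none → segs d cs = [cs] := by
  induction cs with
  | nil => intro d _; rfl
  | cons ch cs ih =>
    intro d hs
    rw [scan] at hs
    conv_lhs => rw [segs]
    split_ifs at hs ⊢ with h1 h2 h3
    · simp [ih (d + 1) (by simpa using hs)]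
    · simp [ih (d - 1) (by simpa using hs)]
    · have h4 : segs d cs = [cs] := ih d (by simpa using hs)
      simp [h4]

lemma scan_lt (cs : List Char) : ∀ (d : Int) (n : Nat), scan d cs = some n → n < cs.length := by
  induction cs with
  | nil => intro d n hs; simp [scan] at hs
  | cons ch cs ih =>
    intro d n hs
    rw [scan] at hs
    split_ifs at hs with h1 h2 h3
    · cases hs' : scan (d+1) cs with
      | none => simp [hs'] at hs
      | some m => simp [hs'] at hs; have := ih _ _ hs'; simp; omega
    · cases hs' : scan (d-1) cs with
      | none => simp [hs'] at hs
      | some m => simp [hs'] at hs; have := ih _ _ hs'; simp; omega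
    · simp at hs; simp [← hs]
    · cases hs' : scan d cs with
      | none => simp [hs'] at hs
      | some m => simp [hs'] at hs; have := ih _ _ hs'; simp; omega

lemma scan_some_segs (cs : List Char) : ∀ (d : Int) (n : Nat), scan d cs = some n →
    segs d cs = cs.take n :: segs 0 (cs.drop (n + 1)) := by
  induction cs with
  | nil => intro d n hs; simp [scan] at hs
  | cons ch cs ih =>
    intro d n hs
    rw [scan] at hs
    conv_lhs => rw [segs]
    split_ifs at hs ⊢ with h1 h2 h3
    · cases hs' : scan (d+1) cs with
      | none => simp [hs'] at hs
      | some m =>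
        simp [hs'] at hs
        rw [ih (d+1) m hs']
        subst hs
        simp
    · cases hs' : scan (d-1) cs with
      | none => simp [hs'] at hs
      | some m =>
        simp [hs'] at hs
        rw [ih (d-1) m hs']
        subst hs
        simp
    · simp at hs
      subst hs
      have hd : d = 0 := h3.2
      subst hd
      simp
    · cases hs' : scan d cs with
      | none => simp [hs'] at hs
      | some m =>
        simp [hs'] at hs
        rw [ih d m hs']
        subst hs
        simp

-- rendering a nonempty segment list: all but the last, plus the last unless it strips to blank
def render : List (List Char) → List String
  | [] => []
  | [a] => if PySem.Chars.strip a ≠ [] then [String.mk a] else []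
  | a :: b :: g => String.mk a :: render (b :: g)

lemma render_cons (a : List Char) (g : List (List Char)) (hg : g ≠ []) :
    render (a :: g) = String.mk a :: render g := by
  cases g with
  | nil => exact absurd rfl hg
  | cons b g => rfl

-- B's loop computes render of the remaining segments
lemma altLoop_eq : ∀ (fuel : Nat) (rest : List Char) (items : List String),
    rest.length < fuel →
    altLoop fuel rest items = items ++ render (segs 0 rest) := by
  intro fuel
  induction fuel with
  | zero => intro rest items h; omega
  | succ fuel ih =>
    intro rest items h
    rw [altLoop, firstCut_eq_scan]
    cases hs : scan 0 rest with
    | none =>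
      simp only [Option.elim_none]
      rw [scan_none_segs _ _ hs]
      simp only [render]
      split_ifs <;> simp
    | some n =>
      have hn : n < rest.length := scan_lt _ _ _ hs
      have hsegs := scan_some_segs _ _ _ hs
      simp only [Option.elim_some]
      have h0 : (0 : Int) ≤ ((n : Nat) : Int) := Int.natCast_nonneg _
      rw [if_neg (by intro hneg; rw [hneg] at h0; norm_num at h0)]
      have hto : PySem.List.slice rest none (some ((n : Nat) : Int)) = rest.take n :=
        PySem.List.slice_to_natCast _ _
      have hc : ((n : Nat) : Int) + 1 = (((n + 1 : Nat)) : Int) := by push_cast; ring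
      have hfrom : PySem.List.slice rest (some (((n : Nat) : Int) + 1)) none
          = rest.drop (n + 1) := by
        rw [hc, PySem.List.slice_from_natCast]
      rw [hto, hfrom]
      rw [ih (rest.drop (n + 1)) _ (by rw [List.length_drop]; omega)]
      rw [hsegs, render_cons _ _ (segs_ne_nil _ _)]
      simp [List.append_assoc]

-- A's fold, from an arbitrary state, in terms of segs
lemma foldA_eq (cs : List Char) : ∀ (d : Int) (items : List String) (cur : List Char),
    cs.foldl stepA (items, d, cur)
    = (items ++ (((cur ++ (segs d cs).headI) :: (segs d cs).tail).dropLast).map String.mk,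
       cs.foldl bumpD d,
       ((cur ++ (segs d cs).headI) :: (segs d cs).tail).getLastD []) := by
  induction cs with
  | nil => intro d items cur; simp [segs]
  | cons ch cs ih =>
    intro d items cur
    rw [List.foldl_cons, List.foldl_cons]
    by_cases h1 : ch = '[' ∨ ch = '{'
    · have hnc : ¬ ch = ',' := by rcases h1 with h | h <;> simp [h]
      have hx : stepA (items, d, cur) ch = (items, d + 1, cur ++ [ch]) := by
        simp [stepA, h1, hnc]
      have hb : bumpD d ch = d + 1 := by simp [bumpD, h1]
      rw [hx, hb, ih]
      obtain ⟨t, ts, hts⟩ := List.exists_cons_of_ne_nil (segs_ne_nil (d + 1) cs)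
      conv_rhs => rw [segs]
      simp [h1, hts, List.append_assoc]
    · by_cases h2 : ch = ']' ∨ ch = '}'
      · have hnc : ¬ ch = ',' := by rcases h2 with h | h <;> simp [h]
        have hx : stepA (items, d, cur) ch = (items, d - 1, cur ++ [ch]) := by
          simp [stepA, h1, h2, hnc]
        have hb : bumpD d ch = d - 1 := by simp [bumpD, h1, h2]
        rw [hx, hb, ih]
        obtain ⟨t, ts, hts⟩ := List.exists_cons_of_ne_nil (segs_ne_nil (d - 1) cs)
        conv_rhs => rw [segs]
        simp [h1, h2, hts, List.append_assoc]
      · by_cases h3 : ch = ',' ∧ d = 0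
        · obtain ⟨hc, hd⟩ := h3
          subst hc
          subst hd
          have hx : stepA (items, 0, cur) ',' = (items ++ [String.mk cur], 0, []) := by
            simp [stepA]
          have hb : bumpD 0 ',' = 0 := by simp [bumpD]
          rw [hx, hb, ih]
          obtain ⟨t, ts, hts⟩ := List.exists_cons_of_ne_nil (segs_ne_nil 0 cs)
          conv_rhs => rw [segs]
          simp [hts, List.append_assoc]
        · have hx : stepA (items, d, cur) ch = (items, d, cur ++ [ch]) := by
            simp [stepA, h1, h2, h3]
          have hb : bumpD d ch = d := by simp [bumpD, h1, h2]
          rw [hx, hb, ih]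
          obtain ⟨t, ts, hts⟩ := List.exists_cons_of_ne_nil (segs_ne_nil d cs)
          conv_rhs => rw [segs]
          simp [h1, h2, h3, hts, List.append_assoc]

lemma render_eq (g : List (List Char)) (hg : g ≠ []) :
    (g.dropLast).map String.mk ++
      (if PySem.Chars.strip (g.getLastD []) ≠ [] then [String.mk (g.getLastD [])] else [])
    = render g := by
  induction g with
  | nil => exact absurd rfl hg
  | cons a g ih =>
    cases g with
    | nil => simp [render]
    | cons b g =>
      rw [render_cons _ _ (by simp), ← ih (by simp)]
      simp

-- ===== VERDICT (by name: the statement is the Claim_ definition above) =====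
theorem split_flow_py_spec : Claim_equal_split_flow_py := by
  intro s _
  unfold Spec_split_flow_py split_flow_py split_flow_py_alt
  rw [altLoop_eq (s.toList.length + 1) s.toList [] (by omega)]
  simp only [List.nil_append]
  rw [foldA_eq s.toList 0 [] []]
  obtain ⟨t, ts, hts⟩ := List.exists_cons_of_ne_nil (segs_ne_nil 0 s.toList)
  rw [hts]
  simp only [List.nil_append, List.headI_cons, List.tail_cons]
  rw [← render_eq (t :: ts) (by simp)]
  split_ifs <;> simp
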